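-- pv_equiv track=rewrite | github.com/Tarzan1984/pyromaths | src/pyromaths/outils/Priorites3.py | recherche_parentheses
-- ===== SOURCE A (Python) =====
-- def recherche_parentheses(calcul):
--     """**recherche_parentheses**\ (*calcul*)
--
--     Recherche les premières parenthèses (éventuellement intérieures) dans une expression
--
--     :param calcul: le calcul à traiter
--     :type calcul: list
--
--     >>> from pyromaths.outils import Priorites3
--     >>> Priorites3.recherche_parentheses(['-6', '*', '(-11)', '*', '(-5)'])
--     >>>
--     >>> Priorites3.recherche_parentheses(['-9', '-', '6', '*', '(', '(-2)', '-', '4', ')'])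
--     (4, 9)
--
--     :rtype: tuple
--     """
--     if calcul.count("("):
--         debut = calcul.index("(")
--         if calcul[debut+1:].count(")"): fin = calcul[debut:].index(")") + debut
--         else: return None
--         for dummy in range(calcul[debut + 1:fin].count("(")):
--             debut += calcul[debut+1:].index("(") + 1
--         return (debut, fin+1)
--     else:
--         return None
-- ===== SOURCE B (Python) =====
-- def recherche_parentheses(calcul):
--     last_open = None
--     for i, tok in enumerate(calcul):
--         if tok == "(":
--             last_open = i
--         elif tok == ")" and last_open is not None:
--             return (last_open, i + 1)
--     return None
-- ===== Notes on version B (the rewrite author's own statement) =====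
-- stated objective: simpler
-- what changed: Replaced A's multi-pass count/index/slice logic (count, index, repeated slicing plus a rescan loop over the inner '(' count) by a single left-to-right scan that remembers the index of the last bare '(' and returns on the first bare ')' that follows one.
import Mathlib
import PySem

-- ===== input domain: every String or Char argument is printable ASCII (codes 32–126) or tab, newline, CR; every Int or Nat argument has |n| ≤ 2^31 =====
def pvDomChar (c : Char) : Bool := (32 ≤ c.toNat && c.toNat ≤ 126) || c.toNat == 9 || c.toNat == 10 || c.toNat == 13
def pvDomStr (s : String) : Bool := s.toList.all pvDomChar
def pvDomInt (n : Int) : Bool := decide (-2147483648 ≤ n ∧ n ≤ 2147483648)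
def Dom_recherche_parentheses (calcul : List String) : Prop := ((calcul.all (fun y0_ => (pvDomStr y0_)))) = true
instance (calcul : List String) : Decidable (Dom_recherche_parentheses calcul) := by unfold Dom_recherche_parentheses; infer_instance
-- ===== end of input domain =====

-- B replaces A's multi-pass count/index/slice logic by one plain left-to-right scan (simpler).

-- ===== PORT A =====
-- Literal port of A.  The `none` fallbacks of the matches and the `.getD 0` are
-- unreachable guards: the preceding count checks guarantee the searched token exists
-- (in Python the corresponding .index call cannot raise there).
def recherche_parentheses (calcul : List String) : Option (Int × Int) :=
  if PySem.List.count calcul "(" ≠ 0 then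
    match PySem.List.index? calcul "(" with
    | none => none
    | some debut0 =>
      if PySem.List.count (PySem.List.slice calcul (some ((debut0 : Int) + 1)) none) ")" ≠ 0 then
        match PySem.List.index? (PySem.List.slice calcul (some (debut0 : Int)) none) ")" with
        | none => none
        | some f =>
          let fin : Nat := f + debut0
          let debut : Nat :=
            (List.range (PySem.List.count
                (PySem.List.slice calcul (some ((debut0 : Int) + 1)) (some (fin : Int))) "(")).foldl
              (fun d _ =>
                d + ((PySem.List.index? (PySem.List.slice calcul (some ((d : Int) + 1)) none) "(").getD 0) + 1)
              debut0
          some ((debut : Int), (fin : Int) + 1)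
      else none
  else none

-- ===== PORT B =====
-- helper for B: scan with current index and the index of the last bare "(" seen
def rpGo : List String → Nat → Option Nat → Option (Int × Int)
  | [], _, _ => none
  | t :: ts, i, lastOpen =>
    if t = "(" then rpGo ts (i + 1) (some i)
    else if t = ")" then
      match lastOpen with
      | some d => some ((d : Int), (i : Int) + 1)
      | none => rpGo ts (i + 1) none
    else rpGo ts (i + 1) lastOpen

def recherche_parentheses_alt (calcul : List String) : Option (Int × Int) :=
  rpGo calcul 0 none

-- ===== PRECONDITION & SPEC =====
def Spec_recherche_parentheses (calcul : List String) (out : Option (Int × Int)) : Prop := out = recherche_parentheses_alt calcul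
instance (calcul : List String) (out : Option (Int × Int)) : Decidable (Spec_recherche_parentheses calcul out) := by unfold Spec_recherche_parentheses; infer_instance

-- ===== CLAIM (what is proved, stated in full; the proofs are below) =====
def Claim_equal_recherche_parentheses : Prop := ∀ (calcul : List String), Dom_recherche_parentheses calcul → Spec_recherche_parentheses calcul (recherche_parentheses calcul)

-- ===== LEMMAS AND PROOFS =====

-- absolute index of the last "(" in l (scan starting at index i), default acc
def rpLastO : List String → Nat → Nat → Nat
  | [], _, acc => acc
  | t :: ts, i, acc => rpLastO ts (i + 1) (if t = "(" then i else acc)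

theorem rpLastO_append (l₁ l₂ : List String) (i acc : Nat) :
    rpLastO (l₁ ++ l₂) i acc = rpLastO l₂ (i + l₁.length) (rpLastO l₁ i acc) := by
  induction l₁ generalizing i acc with
  | nil => simp [rpLastO]
  | cons t ts ih =>
    simp only [List.cons_append, rpLastO, ih, List.length_cons]
    ring_nf

theorem rpLastO_no_open (l : List String) (i acc : Nat) (h : "(" ∉ l) :
    rpLastO l i acc = acc := by
  induction l generalizing i acc with
  | nil => rfl
  | cons t ts ih =>
    simp only [List.mem_cons, not_or] at h
    simp [rpLastO, Ne.symm h.1, ih _ _ h.2]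

theorem rpGo_skip (pre rest : List String) (i : Nat) (h : "(" ∉ pre) :
    rpGo (pre ++ rest) i none = rpGo rest (i + pre.length) none := by
  induction pre generalizing i with
  | nil => simp
  | cons t ts ih =>
    simp only [List.mem_cons, not_or] at h
    simp only [List.cons_append, rpGo, if_neg (Ne.symm h.1)]
    by_cases ht : t = ")"
    · simp only [if_pos ht, ih _ h.2, List.length_cons]; ring_nf
    · simp only [if_neg ht, ih _ h.2, List.length_cons]; ring_nf

theorem rpGo_no_close (l : List String) (i : Nat) (lo : Option Nat) (h : ")" ∉ l) :
    rpGo l i lo = none := by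
  induction l generalizing i lo with
  | nil => rfl
  | cons t ts ih =>
    simp only [List.mem_cons, not_or] at h
    by_cases ht : t = "("
    · simp [rpGo, ht, ih _ _ h.2]
    · simp [rpGo, ht, Ne.symm h.1, ih _ _ h.2]

theorem rpGo_found (mid suf : List String) (i d : Nat) (h : ")" ∉ mid) :
    rpGo (mid ++ ")" :: suf) i (some d) =
      some ((rpLastO mid i d : Int), (i : Int) + (mid.length : Int) + 1) := by
  induction mid generalizing i d with
  | nil => simp [rpGo, rpLastO]
  | cons t ts ih =>
    simp only [List.mem_cons, not_or] at h
    by_cases ht : t = "("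
    · simp only [List.cons_append, rpGo, ih _ _ h.2, rpLastO, if_pos ht,
        List.length_cons]
      push_cast; ring_nf
    · simp only [List.cons_append, rpGo, if_neg (Ne.symm h.1), ih _ _ h.2,
        rpLastO, if_neg ht, List.length_cons]
      push_cast; ring_nf

theorem rp_foldl_range_iterate {α : Type} (g : α → α) (n : Nat) (a : α) :
    (List.range n).foldl (fun x _ => g x) a = g^[n] a := by
  induction n generalizing a with
  | zero => rfl
  | succ m ih =>
    rw [List.range_succ, List.foldl_append, ih, Function.iterate_succ_apply']
    rfl

-- the loop of A advances debut to the last "(" of mid (or leaves it if mid contains no "(")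
theorem rp_iterate_lastO (n : Nat) :
    ∀ (mid : List String), mid.length = n → ∀ (c rest : List String) (d : Nat),
      c.drop (d + 1) = mid ++ rest →
      (fun a : Nat =>
          a + ((PySem.List.index? (PySem.List.slice c (some ((a : Int) + 1)) none) "(").getD 0) + 1)^[mid.count "("]
        d = rpLastO mid (d + 1) d := by
  induction n using Nat.strong_induction_on with
  | _ n IH =>
    intro mid hlen c rest d hdrop
    by_cases hmem : "(" ∈ mid
    · obtain ⟨k, hk⟩ : ∃ k, PySem.List.index? mid "(" = some k := by
        rcases Option.isSome_iff_exists.mp ((PySem.List.index?_isSome_iff mid "(").mpr hmem)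
          with ⟨k, hk⟩
        exact ⟨k, hk⟩
      obtain ⟨m1, m2, hmid, hm1len, hm1⟩ := (PySem.List.index?_eq_some_iff _ _ _).mp hk
      have hcount : mid.count "(" = m2.count "(" + 1 := by
        subst hmid
        simp [List.count_append, List.count_eq_zero_of_not_mem hm1]
      have hidx : PySem.List.index? (mid ++ rest) "(" = some m1.length := by
        apply (PySem.List.index?_eq_some_iff _ _ _).mpr
        exact ⟨m1, m2 ++ rest, by simp [hmid], rfl, hm1⟩
      have hslice : PySem.List.slice c (some ((d : Int) + 1)) none = mid ++ rest := by
        have : ((d : Int) + 1) = ((d + 1 : Nat) : Int) := by push_cast; ring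
        rw [this, PySem.List.slice_from_natCast, hdrop]
      have hdrop2 : c.drop ((d + m1.length + 1) + 1) = m2 ++ rest := by
        have : c.drop ((d + m1.length + 1) + 1) = (c.drop (d + 1)).drop (m1.length + 1) := by
          rw [List.drop_drop]; ring_nf
        rw [this, hdrop, hmid]
        have : (m1 ++ "(" :: m2) ++ rest = (m1 ++ ["("]) ++ (m2 ++ rest) := by simp
        rw [this, List.drop_append_of_le_length (by simp)]
        simp
      have hm2len : m2.length < n := by
        subst hmid hlen; simp; omega
      have hIH := IH m2.length hm2len m2 rfl c rest (d + m1.length + 1) hdrop2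
      rw [hcount, Function.iterate_succ_apply]
      simp only [hslice, hidx, Option.getD_some]
      rw [hIH]
      subst hmid
      rw [rpLastO_append, rpLastO_no_open m1 _ _ hm1]
      simp only [rpLastO]
      have : d + 1 + m1.length = d + m1.length + 1 := by ring
      rw [this]
      simp
    · rw [List.count_eq_zero_of_not_mem hmem, Function.iterate_zero_apply,
        rpLastO_no_open mid _ _ hmem]

-- ===== VERDICT (by name: the statement is the Claim_ definition above) =====
theorem recherche_parentheses_spec : Claim_equal_recherche_parentheses := by
  intro calcul _
  unfold Spec_recherche_parentheses recherche_parentheses recherche_parentheses_alt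
  by_cases hopen : "(" ∈ calcul
  · obtain ⟨k, hk⟩ : ∃ k, PySem.List.index? calcul "(" = some k := by
      rcases Option.isSome_iff_exists.mp ((PySem.List.index?_isSome_iff calcul "(").mpr hopen)
        with ⟨k, hk⟩
      exact ⟨k, hk⟩
    obtain ⟨pre, rest, hcal, hprelen, hpre⟩ := (PySem.List.index?_eq_some_iff _ _ _).mp hk
    have hcnt : PySem.List.count calcul "(" ≠ 0 := by
      have h := List.count_pos_iff.mpr hopen
      simp only [PySem.List.count_eq]
      omega
    rw [if_pos hcnt, hk]
    dsimp only
    have hdrop1 : calcul.drop (k + 1) = rest := by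
      subst hcal hprelen
      have : pre ++ "(" :: rest = (pre ++ ["("]) ++ rest := by simp
      rw [this, List.drop_append_of_le_length (by simp)]
      simp
    have hslice1 : PySem.List.slice calcul (some ((k : Int) + 1)) none = rest := by
      have : ((k : Int) + 1) = ((k + 1 : Nat) : Int) := by push_cast; ring
      rw [this, PySem.List.slice_from_natCast, hdrop1]
    by_cases hclose : ")" ∈ rest
    · obtain ⟨m, hm⟩ : ∃ m, PySem.List.index? rest ")" = some m := by
        rcases Option.isSome_iff_exists.mp ((PySem.List.index?_isSome_iff rest ")").mpr hclose)
          with ⟨m, hm⟩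
        exact ⟨m, hm⟩
      obtain ⟨mid, suf, hrest, hmidlen, hmid⟩ := (PySem.List.index?_eq_some_iff _ _ _).mp hm
      have hcnt2 : PySem.List.count (PySem.List.slice calcul (some ((k : Int) + 1)) none) ")" ≠ 0 := by
        rw [hslice1]
        have h := List.count_pos_iff.mpr hclose
        simp only [PySem.List.count_eq]
        omega
      rw [if_pos hcnt2]
      have hdrop0 : calcul.drop k = "(" :: rest := by
        subst hcal hprelen
        rw [List.drop_append_of_le_length (by simp)]
        simp
      have hslice0 : PySem.List.slice calcul (some (k : Int)) none = "(" :: rest := by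
        rw [PySem.List.slice_from_natCast, hdrop0]
      have hidx2 : PySem.List.index? (PySem.List.slice calcul (some (k : Int)) none) ")"
          = some (mid.length + 1) := by
        rw [hslice0]
        apply (PySem.List.index?_eq_some_iff _ _ _).mpr
        refine ⟨"(" :: mid, suf, by simp [hrest], by simp, ?_⟩
        subst hmidlen
        simp only [List.mem_cons, not_or]
        exact ⟨by decide, hmid⟩
      rw [hidx2]
      dsimp only
      have hslicemid : PySem.List.slice calcul (some ((k : Int) + 1)) (some ((mid.length + 1 + k : Nat) : Int))
          = mid := by
        have h1 : ((k : Int) + 1) = ((k + 1 : Nat) : Int) := by push_cast; ring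
        rw [h1, PySem.List.slice_natCast, hdrop1, hrest]
        have : (mid.length + 1 + k) - (k + 1) = mid.length := by omega
        rw [this, List.take_append_of_le_length (le_refl _)]
        simp
      -- A's side
      have hfold := rp_iterate_lastO mid.length mid rfl calcul (")" :: suf) k
        (by rw [hdrop1, hrest])
      rw [rp_foldl_range_iterate] at *
      simp only [hslicemid, PySem.List.count_eq]
      rw [hfold]
      -- B's side
      subst hcal hrest hprelen
      rw [rpGo_skip pre _ 0 hpre]
      simp only [Nat.zero_add, rpGo]
      rw [rpGo_found mid suf (pre.length + 1) pre.length hmid]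
      simp only [if_true]
      push_cast
      ring_nf
    · have hcnt2 : ¬ PySem.List.count (PySem.List.slice calcul (some ((k : Int) + 1)) none) ")" ≠ 0 := by
        rw [hslice1]
        simp only [ne_eq, not_not, PySem.List.count_eq]
        exact List.count_eq_zero_of_not_mem hclose
      rw [if_neg hcnt2]
      subst hcal hprelen
      rw [rpGo_skip pre _ 0 hpre]
      simp only [Nat.zero_add, rpGo]
      rw [rpGo_no_close rest _ _ hclose]
      rfl
  · have hcnt : ¬ PySem.List.count calcul "(" ≠ 0 := by
      simp [PySem.List.count_eq, List.count_eq_zero_of_not_mem hopen]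
    rw [if_neg hcnt]
    rw [show calcul = calcul ++ [] by simp, rpGo_skip calcul [] 0 hopen]
    rfl
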